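-- pv_equiv track=rewrite | github.com/wyk18703232953/myResearch | codeComplex/data/filteredData/python/logn/python_logn_0632.py | solve
-- ===== SOURCE A (Python) =====
-- def cal(x, n):
--     return (1 + n - x) * (n - x) // 2 - x
--
-- def solve(n, k):
--     low, hgh = 0, n
--     while low <= hgh:
--         mid = (low + hgh) // 2
--         cm = cal(mid, n)
--         if cm == k:
--             return mid
--         elif cm > k:
--             low = mid + 1
--         else:
--             hgh = mid - 1
--     return None  # 理论上原题保证有解，这里加个兜底
-- ===== SOURCE B (Python) =====
-- def cal(x, n):
--     return (1 + n - x) * (n - x) // 2 - x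
--
-- def _isqrt(a):
--     # Newton's method for the integer square root, a >= 0
--     if a == 0:
--         return 0
--     x = a
--     y = (x + a // x) // 2
--     while y < x:
--         x = y
--         y = (x + a // x) // 2
--     return x
--
-- def solve(n, k):
--     # cal(x, n) == k  <=>  (n-x)**2 + 3*(n-x) == 2*(n+k); solve that quadratic directly
--     t = 8 * (n + k) + 9
--     if t < 0:
--         return None
--     s = _isqrt(t)
--     if s * s != t:
--         return None
--     x = n - (s - 3) // 2
--     if 0 <= x <= n and cal(x, n) == k:
--         return x
--     return None
-- ===== Notes on version B (the rewrite author's own statement) =====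
-- stated objective: alternative
-- what changed: Replaced the binary search over [0, n] with a closed-form solve of the quadratic cal(x,n)=k: compute the discriminant 8*(n+k)+9, take its integer square root with a hand-written Newton iteration, derive the unique candidate x and verify it; no search over the interval.
import Mathlib
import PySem

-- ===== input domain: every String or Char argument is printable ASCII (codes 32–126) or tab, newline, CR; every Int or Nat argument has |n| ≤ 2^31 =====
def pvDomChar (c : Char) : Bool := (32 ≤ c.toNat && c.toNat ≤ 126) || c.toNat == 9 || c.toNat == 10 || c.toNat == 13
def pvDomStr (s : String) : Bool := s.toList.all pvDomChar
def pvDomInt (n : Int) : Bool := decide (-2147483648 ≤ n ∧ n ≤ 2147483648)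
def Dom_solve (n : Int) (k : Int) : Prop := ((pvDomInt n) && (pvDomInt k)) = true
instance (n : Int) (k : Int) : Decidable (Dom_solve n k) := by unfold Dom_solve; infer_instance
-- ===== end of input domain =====

-- B replaces A's binary search with a closed-form quadratic solve: cal(x,n)=k becomes
-- (n-x)^2+3(n-x)=2(n+k), solved via a hand-written Newton integer square root; same return value.


-- ===== PORT A =====
def cal (x : Int) (n : Int) : Int :=
  PySem.Int.floordiv ((1 + n - x) * (n - x)) 2 - x

-- the while-loop of A, state (low, hgh); mid = (low + hgh) // 2 is written inline
def solveLoop (n : Int) (k : Int) (low : Int) (hgh : Int) : Option Int :=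
  if h : low ≤ hgh then
    if cal (PySem.Int.floordiv (low + hgh) 2) n = k then some (PySem.Int.floordiv (low + hgh) 2)
    else if cal (PySem.Int.floordiv (low + hgh) 2) n > k then
      solveLoop n k (PySem.Int.floordiv (low + hgh) 2 + 1) hgh
    else solveLoop n k low (PySem.Int.floordiv (low + hgh) 2 - 1)
  else none
termination_by (hgh + 1 - low).toNat
decreasing_by
  · have hb := PySem.Int.floordiv_two_mid_bounds h
    omega
  · have hb := PySem.Int.floordiv_two_mid_bounds h
    omega

def solve (n : Int) (k : Int) : Option Int := solveLoop n k 0 n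

-- ===== PORT B =====
-- the Newton loop of _isqrt; the fuel only makes the recursion total (a >= 1 needs < a steps)
def isqrtLoop (fuel : Nat) (a : Int) (x : Int) : Int :=
  match fuel with
  | 0 => x
  | fuel + 1 =>
    if PySem.Int.floordiv (x + PySem.Int.floordiv a x) 2 < x then
      isqrtLoop fuel a (PySem.Int.floordiv (x + PySem.Int.floordiv a x) 2)
    else x

def isqrt (a : Int) : Int :=
  if a = 0 then 0 else isqrtLoop (a.toNat + 1) a a

-- t = 8*(n+k)+9, s = isqrt t and the candidate x are written inline
def solve_alt (n : Int) (k : Int) : Option Int :=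
  if 8 * (n + k) + 9 < 0 then none
  else if isqrt (8 * (n + k) + 9) * isqrt (8 * (n + k) + 9) ≠ 8 * (n + k) + 9 then none
  else if 0 ≤ n - PySem.Int.floordiv (isqrt (8 * (n + k) + 9) - 3) 2 ∧
          n - PySem.Int.floordiv (isqrt (8 * (n + k) + 9) - 3) 2 ≤ n ∧
          cal (n - PySem.Int.floordiv (isqrt (8 * (n + k) + 9) - 3) 2) n = k then
    some (n - PySem.Int.floordiv (isqrt (8 * (n + k) + 9) - 3) 2)
  else none

-- ===== PRECONDITION & SPEC =====
def Spec_solve (n : Int) (k : Int) (out : Option Int) : Prop := out = solve_alt n k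
instance (n : Int) (k : Int) (out : Option Int) : Decidable (Spec_solve n k out) := by unfold Spec_solve; infer_instance

-- ===== CLAIM (what is proved, stated in full; the proofs are below) =====
def Claim_equal_solve : Prop := ∀ (n : Int) (k : Int), Dom_solve n k → Spec_solve n k (solve n k)

-- ===== LEMMAS AND PROOFS =====

-- exact value of cal: the product of two consecutive integers is even, so // 2 is exact
lemma cal_eq (x n : Int) : 2 * cal x n = (1 + n - x) * (n - x) - 2 * x := by
  have he : Even ((n - x) * ((n - x) + 1)) := Int.even_mul_succ_self (n - x)
  obtain ⟨t, ht⟩ := he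
  have hprod : (1 + n - x) * (n - x) = 2 * t := by ring_nf; ring_nf at ht; omega
  have hd : PySem.Int.floordiv ((1 + n - x) * (n - x)) 2 = t := by
    rw [PySem.Int.floordiv_eq_iff_of_pos (by omega : (0:Int) < 2)]
    omega
  unfold cal
  rw [hd]
  omega

-- cal is strictly decreasing on (-∞, n]
lemma cal_anti {x y n : Int} (hxy : x < y) (hyn : y ≤ n) : cal y n < cal x n := by
  have hx := cal_eq x n
  have hy := cal_eq y n
  nlinarith [mul_pos (by omega : (0:Int) < y - x) (by nlinarith : (0:Int) < (n - x) + (n - y) + 3)]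

-- soundness of A's loop: a returned value lies in [low, hgh] and solves cal = k
lemma loop_some {n k : Int} : ∀ low hgh x : Int,
    solveLoop n k low hgh = some x → low ≤ x ∧ x ≤ hgh ∧ cal x n = k := by
  intro low hgh
  induction low, hgh using solveLoop.induct n k with
  | case1 low hgh h heq =>
      intro x hs
      rw [solveLoop] at hs
      simp only [dif_pos h, if_pos heq, Option.some.injEq] at hs
      have hb := PySem.Int.floordiv_two_mid_bounds h
      subst hs
      exact ⟨hb.1, hb.2, heq⟩
  | case2 low hgh h hne hgt ih =>
      intro x hs
      rw [solveLoop] at hs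
      simp only [dif_pos h, if_neg hne, if_pos hgt] at hs
      have hb := PySem.Int.floordiv_two_mid_bounds h
      have := ih x hs
      exact ⟨by omega, this.2.1, this.2.2⟩
  | case3 low hgh h hne hle ih =>
      intro x hs
      rw [solveLoop] at hs
      simp only [dif_pos h, if_neg hne, if_neg hle] at hs
      have hb := PySem.Int.floordiv_two_mid_bounds h
      have := ih x hs
      exact ⟨this.1, by omega, this.2.2⟩
  | case4 low hgh h =>
      intro x hs
      rw [solveLoop] at hs
      simp [dif_neg h] at hs

-- completeness of A's loop: if a solution lies in [low, hgh] ⊆ (-∞, n], the loop finds one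
lemma loop_complete {n k : Int} : ∀ low hgh x : Int, hgh ≤ n →
    low ≤ x → x ≤ hgh → cal x n = k → (solveLoop n k low hgh).isSome := by
  intro low hgh
  induction low, hgh using solveLoop.induct n k with
  | case1 low hgh h heq =>
      intro x _ _ _ _
      rw [solveLoop]
      simp only [dif_pos h, if_pos heq, Option.isSome_some]
  | case2 low hgh h hne hgt ih =>
      intro x hn hlx hxh hx
      rw [solveLoop]
      simp only [dif_pos h, if_neg hne, if_pos hgt]
      have hb := PySem.Int.floordiv_two_mid_bounds h
      have hmx : PySem.Int.floordiv (low + hgh) 2 + 1 ≤ x := by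
        by_contra hc
        have hxm : x ≤ PySem.Int.floordiv (low + hgh) 2 := by omega
        rcases eq_or_lt_of_le hxm with heq2 | hlt
        · exact hne (heq2 ▸ hx)
        · have := cal_anti hlt (by omega : PySem.Int.floordiv (low + hgh) 2 ≤ n)
          omega
      exact ih x hn hmx hxh hx
  | case3 low hgh h hne hle ih =>
      intro x hn hlx hxh hx
      rw [solveLoop]
      simp only [dif_pos h, if_neg hne, if_neg hle]
      have hb := PySem.Int.floordiv_two_mid_bounds h
      have hxm : x ≤ PySem.Int.floordiv (low + hgh) 2 - 1 := by
        by_contra hc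
        have hmx : PySem.Int.floordiv (low + hgh) 2 ≤ x := by omega
        rcases eq_or_lt_of_le hmx with heq2 | hlt
        · exact hne (heq2 ▸ hx)
        · have := cal_anti hlt (by omega : x ≤ n)
          omega
      exact ih x (by omega) hlx hxm hx
  | case4 low hgh h =>
      intro x _ hlx hxh _
      omega

-- Newton's loop returns the exact root on a perfect square (invariant c ≤ x)
lemma isqrtLoop_sq : ∀ (fuel : Nat) (c x : Int), 1 ≤ c → c ≤ x → (x - c).toNat < fuel →
    isqrtLoop fuel (c * c) x = c := by
  intro fuel
  induction fuel with
  | zero => intro c x _ _ hf; omega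
  | succ fuel ih =>
      intro c x hc hcx hf
      have hx1 : (0:Int) < x := by omega
      have hq := PySem.Int.floordiv_mul_add_mod (c * c) x
      have hqr0 := PySem.Int.mod_nonneg (c * c) hx1
      have hqr1 := PySem.Int.mod_lt (c * c) hx1
      have hy := PySem.Int.floordiv_mul_add_mod (x + PySem.Int.floordiv (c * c) x) 2
      have hyr0 := PySem.Int.mod_nonneg (x + PySem.Int.floordiv (c * c) x) (by omega : (0:Int) < 2)
      have hyr1 := PySem.Int.mod_lt (x + PySem.Int.floordiv (c * c) x) (by omega : (0:Int) < 2)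
      set q := PySem.Int.floordiv (c * c) x with hqdef
      set y := PySem.Int.floordiv (x + q) 2 with hydef
      -- AM–GM, floored: the Newton iterate never drops below the root
      have hcy : c ≤ y := by nlinarith [sq_nonneg (c - x)]
      rw [isqrtLoop]
      by_cases hlt : y < x
      · rw [if_pos hlt]
        exact ih c y hc hcy (by omega)
      · rw [if_neg hlt]
        -- at exit x + q ≥ 2x, so q ≥ x, so x² ≤ qx ≤ c², so x ≤ c
        have hxc : x ≤ c := by nlinarith
        omega

lemma isqrt_sq (c : Int) (hc : 1 ≤ c) : isqrt (c * c) = c := by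
  unfold isqrt
  rw [if_neg (by nlinarith)]
  exact isqrtLoop_sq _ c (c * c) hc (by nlinarith) (by
    have : ((c * c - c).toNat : Int) = c * c - c := Int.toNat_of_nonneg (by nlinarith)
    omega)

-- B, soundness: a returned value is verified by B itself
lemma alt_some {n k x : Int} (hs : solve_alt n k = some x) :
    0 ≤ x ∧ x ≤ n ∧ cal x n = k := by
  unfold solve_alt at hs
  split_ifs at hs with h1 h2 h3
  obtain rfl : n - PySem.Int.floordiv (isqrt (8 * (n + k) + 9) - 3) 2 = x :=
    Option.some.inj hs
  exact h3

-- B, completeness: a solution x ∈ [0, n] makes the discriminant a perfect square and B returns x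
lemma alt_complete {n k x : Int} (h0 : 0 ≤ x) (hn : x ≤ n) (hx : cal x n = k) :
    solve_alt n k = some x := by
  have hcal := cal_eq x n
  -- with m := n - x ≥ 0:  8(n+k)+9 = (2m+3)²
  have ht : 8 * (n + k) + 9 = (2 * (n - x) + 3) * (2 * (n - x) + 3) := by nlinarith
  have hs : isqrt (8 * (n + k) + 9) = 2 * (n - x) + 3 := by
    rw [ht]; exact isqrt_sq _ (by omega)
  have hm : PySem.Int.floordiv (2 * (n - x) + 3 - 3) 2 = n - x := by
    rw [PySem.Int.floordiv_eq_iff_of_pos (by omega : (0:Int) < 2)]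
    omega
  unfold solve_alt
  rw [if_neg (by nlinarith), hs, if_neg (by rw [ht]; simp), hm]
  rw [if_pos (by exact ⟨by omega, by omega, by rw [show n - (n - x) = x by omega]; exact hx⟩)]
  rw [show n - (n - x) = x by omega]

-- ===== VERDICT (by name: the statement is the Claim_ definition above) =====
theorem solve_spec : Claim_equal_solve := by
  intro n k _
  unfold Spec_solve
  cases hA : solve n k with
  | some x =>
      have hx := loop_some 0 n x hA
      exact (alt_complete hx.1 hx.2.1 hx.2.2).symm
  | none =>
      cases hB : solve_alt n k with
      | none => rfl
      | some y =>
          have hys := alt_some hB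
          have := loop_complete (n := n) (k := k) 0 n y le_rfl hys.1 hys.2.1 hys.2.2
          unfold solve at hA
          rw [hA] at this
          simp at this
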